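-- pv_equiv track=rewrite | github.com/carlosp/advent-of-code | 2023/07-camel-cards/solve_2.py | handSortKey
-- ===== SOURCE A (Python) =====
-- import collections
--
-- CARD_STRENGTH_ORDER = 'AKQT98765432J'
--
-- HAND_STRENGTH_BY_TWO_MOST_COMMON_CARD_COUNTS = {
-- 	(5, 0): 1,
-- 	(4, 1): 2,
-- 	(3, 2): 3,
-- 	(3, 1): 4,
-- 	(2, 2): 5,
-- 	(2, 1): 6,
-- 	(1, 1): 7
-- }
--
-- def handSortKey(hand):
-- 	cardsInHand = collections.Counter(hand)
--
-- 	if jokerCount := cardsInHand['J']: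
-- 		jokerReplacement = next((card for card, _ in cardsInHand.most_common() if card != 'J'), 'A')
-- 		cardsInHand[jokerReplacement] += jokerCount
-- 		del cardsInHand['J']
--
-- 	mostCommonCards = cardsInHand.most_common()
-- 	twoMostCommonCardCounts = mostCommonCards[0][1], 0 if len(mostCommonCards) == 1 else mostCommonCards[1][1]
--
-- 	return HAND_STRENGTH_BY_TWO_MOST_COMMON_CARD_COUNTS[twoMostCommonCardCounts], *map(CARD_STRENGTH_ORDER.index, hand)
-- ===== SOURCE B (Python) =====
-- CARD_STRENGTH_ORDER = 'AKQT98765432J'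
--
-- def _push(top, second, run):
-- 	if run > top:
-- 		return run, top
-- 	if run > second:
-- 		return top, run
-- 	return top, second
--
-- def handSortKey(hand):
-- 	jokers = hand.count('J')
-- 	top = second = run = 0
-- 	prev = None
-- 	for card in sorted(c for c in hand if c != 'J'):
-- 		if card == prev:
-- 			run += 1
-- 		else:
-- 			top, second = _push(top, second, run)
-- 			run, prev = 1, card
-- 	top, second = _push(top, second, run)
-- 	top += jokers
-- 	if top == 5:
-- 		strength = 1
-- 	elif top == 4:
-- 		strength = 2
-- 	elif top == 3:
-- 		strength = 3 if second == 2 else 4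
-- 	elif top == 2:
-- 		strength = 5 if second == 2 else 6
-- 	else:
-- 		strength = 7
-- 	return (strength, *map(CARD_STRENGTH_ORDER.index, hand))
-- ===== Notes on version B (the rewrite author's own statement) =====
-- stated objective: alternative
-- what changed: Replaces A's Counter/most_common/mutate/re-sort pipeline by sort-then-scan: B sorts the non-joker cards, run-length-scans the sorted string in one pass keeping only the two largest run lengths, adds the joker count to the largest, and classifies with an arithmetic if-chain instead of the (top, second) dictionary; no counter dict, no (card,count) sorting, no mutation.
import Mathlib
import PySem

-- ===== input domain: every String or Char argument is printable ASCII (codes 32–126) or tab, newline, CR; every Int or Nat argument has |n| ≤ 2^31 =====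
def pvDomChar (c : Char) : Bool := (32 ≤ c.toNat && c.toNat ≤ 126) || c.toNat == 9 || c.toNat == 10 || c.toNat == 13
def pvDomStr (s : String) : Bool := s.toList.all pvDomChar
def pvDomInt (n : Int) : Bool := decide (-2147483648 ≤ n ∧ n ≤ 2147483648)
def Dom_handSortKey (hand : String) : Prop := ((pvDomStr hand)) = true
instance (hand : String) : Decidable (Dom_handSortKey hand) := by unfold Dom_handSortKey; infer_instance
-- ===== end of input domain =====

-- B drops A's Counter/most_common/mutate/re-sort pipeline entirely: it sorts the non-joker cards,
-- scans the runs of equal cards in one pass keeping the two largest run lengths, adds the jokers to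
-- the largest, and classifies with an if-chain instead of the (top, second) table; objective: alternative.

-- ===== PORT A =====
-- CARD_STRENGTH_ORDER (module constant, used by both versions)
def pvDeck : List Char := "AKQT98765432J".toList

-- HAND_STRENGTH_BY_TWO_MOST_COMMON_CARD_COUNTS (module constant of A)
def pvStrengthTable : PySem.Dict (Int × Int) Int :=
  PySem.Dict.ofList [((5,0),1),((4,1),2),((3,2),3),((3,1),4),((2,2),5),((2,1),6),((1,1),7)]

def handSortKey (hand : String) : List Int :=
  let L := hand.toList
  let cardsInHand := PySem.Dict.counter L
  let jokerCount := cardsInHand.getD 'J' 0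
  let cards :=
    if jokerCount ≠ 0 then
      -- next((card for card, _ in cardsInHand.most_common() if card != 'J'), 'A')
      let jokerReplacement :=
        (((PySem.List.sorted cardsInHand.items (fun p => p.2) true).find?
            (fun p => p.1 != 'J')).map (·.1)).getD 'A'
      (cardsInHand.insert jokerReplacement
        (cardsInHand.getD jokerReplacement 0 + jokerCount)).erase 'J'
    else cardsInHand
  let mostCommonCards := PySem.List.sorted cards.items (fun p => p.2) true
  -- mostCommonCards[0][1] raises IndexError on the empty hand: outside Pre_; default only there
  let first := (mostCommonCards[0]?.getD ('A', 0)).2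
  let second := if mostCommonCards.length = 1 then 0 else (mostCommonCards[1]?.getD ('A', 0)).2
  -- dict lookup raises KeyError / .index raises ValueError outside Pre_; defaults only reached there
  pvStrengthTable.getD (first, second) 0 ::
    L.map (fun c => (((PySem.List.index? pvDeck c).getD 0 : Nat) : Int))

-- ===== PORT B =====
-- _push(top, second, run): merge a finished run length into the two largest seen so far
def pvPush (top second run : Int) : Int × Int :=
  if run > top then (run, top)
  else if run > second then (top, run)
  else (top, second)

-- the body of B's for-loop; the state is (top, second, run, prev)
def pvStep (st : Int × Int × Int × Option Char) (card : Char) : Int × Int × Int × Option Char :=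
  if some card = st.2.2.2 then (st.1, st.2.1, st.2.2.1 + 1, st.2.2.2)
  else ((pvPush st.1 st.2.1 st.2.2.1).1, (pvPush st.1 st.2.1 st.2.2.1).2, 1, some card)

def handSortKey_alt (hand : String) : List Int :=
  let L := hand.toList
  let jokers : Int := (L.count 'J' : Int)
  -- for card in sorted(c for c in hand if c != 'J'): …
  let st := (PySem.List.sorted (L.filter (fun c => c != 'J')) (fun c => c) false).foldl
      pvStep (0, 0, 0, none)
  let ts := pvPush st.1 st.2.1 st.2.2.1
  let top := ts.1 + jokers
  let second := ts.2
  let strength : Int :=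
    if top = 5 then 1
    else if top = 4 then 2
    else if top = 3 then (if second = 2 then 3 else 4)
    else if top = 2 then (if second = 2 then 5 else 6)
    else 7
  -- .index raises ValueError outside Pre_; the default is only reached there
  strength :: L.map (fun c => (((PySem.List.index? pvDeck c).getD 0 : Nat) : Int))

-- ===== PRECONDITION & SPEC =====
-- the (top, second) count profile of the hand with the jokers merged into the top count
def pvProfileL (L : List Char) : Int × Int :=
  match PySem.List.sorted (((PySem.Set.ofList L).filter (fun c => c != 'J')).map
      (fun c => (L.count c : Int))) (fun x => x) true with
  | [] => ((L.count 'J' : Int), 0)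
  | [a] => (a + (L.count 'J' : Int), 0)
  | a :: b :: _ => (a + (L.count 'J' : Int), b)

-- Pre_ is exactly where the Python A returns normally: a nonempty hand of deck cards whose
-- joker-merged count profile is one of the seven table keys; on everything else A raises
-- (IndexError on "", KeyError on a profile outside the table, ValueError on a non-deck card).
def Pre_handSortKey (hand : String) : Prop :=
  hand.toList ≠ [] ∧ hand.toList.all (fun c => pvDeck.contains c) = true ∧
    pvProfileL hand.toList ∈ [((5:Int),(0:Int)),(4,1),(3,2),(3,1),(2,2),(2,1),(1,1)]
instance (hand : String) : Decidable (Pre_handSortKey hand) := by unfold Pre_handSortKey; infer_instance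

def pvWitness_handSortKey : String := "T55J5"

def Spec_handSortKey (hand : String) (out : List Int) : Prop := out = handSortKey_alt hand
instance (hand : String) (out : List Int) : Decidable (Spec_handSortKey hand out) := by unfold Spec_handSortKey; infer_instance

-- ===== CLAIM (what is proved, stated in full; the proofs are below) =====
def Claim_equal_handSortKey : Prop := ∀ (hand : String), Dom_handSortKey hand → Pre_handSortKey hand → Spec_handSortKey hand (handSortKey hand)

-- ===== LEMMAS AND PROOFS =====

-- a nodup list of characters that all equal 'J' and contains 'J' is ['J']
lemma pv_eq_singleton (l : List Char) (hm : 'J' ∈ l) (hnd : l.Nodup)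
    (hall : ∀ c ∈ l, c = 'J') : l = ['J'] := by
  cases l with
  | nil => cases hm
  | cons a t =>
    have ha : a = 'J' := hall a (by simp)
    subst ha
    have ht : t = [] := by
      cases t with
      | nil => rfl
      | cons b u =>
        exfalso
        have hb : b = 'J' := hall b (by simp)
        simp [List.nodup_cons, hb] at hnd
    simp [ht]

-- A reads its (top, second) key off the reverse-sorted items; any weakly descending list with the
-- same multiset of values yields the very same key.
lemma pv_key_eq (ks : List (Char × Int)) (vs : List Int)
    (hperm : (ks.map (fun p => p.2)).Perm vs)
    (hpw : vs.Pairwise (fun a b => b ≤ a)) :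
    (((PySem.List.sorted ks (fun p => p.2) true)[0]?.getD ('A', 0)).2 = vs[0]?.getD 0) ∧
      ((if (PySem.List.sorted ks (fun p => p.2) true).length = 1 then (0:Int)
        else ((PySem.List.sorted ks (fun p => p.2) true)[1]?.getD ('A', 0)).2)
       = (if 1 < vs.length then vs[1]?.getD 0 else 0)) := by
  have hmap : (PySem.List.sorted ks (fun p => p.2) true).map (fun p => p.2) = vs := by
    apply List.Perm.eq_of_pairwise (le := fun a b : Int => b ≤ a)
    · intro a b _ _ h1 h2; omega
    · exact List.pairwise_map.mpr (PySem.List.sorted_pairwise_rev ks (fun p => p.2))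
    · exact hpw
    · exact ((PySem.List.sorted_perm ks (fun p => p.2) true).map (fun p => p.2)).trans hperm
  rw [← hmap]
  cases PySem.List.sorted ks (fun p => p.2) true with
  | nil => simp
  | cons p0 tl =>
    cases tl with
    | nil => simp
    | cons p1 t => simp

-- pvPush is right-commutative on the (top, second) state
lemma pv_push_rcomm (q : Int × Int) (x y : Int) :
    pvPush (pvPush q.1 q.2 x).1 (pvPush q.1 q.2 x).2 y =
      pvPush (pvPush q.1 q.2 y).1 (pvPush q.1 q.2 y).2 x := by
  rcases q with ⟨a, b⟩
  simp only [pvPush]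
  split_ifs <;> simp_all [Prod.ext_iff] <;> omega

-- the pvPush fold is invariant under permutation of the run lengths
lemma pv_foldl_perm (l₁ l₂ : List Int) (p : l₁.Perm l₂) (init : Int × Int) :
    l₁.foldl (fun q x => pvPush q.1 q.2 x) init =
      l₂.foldl (fun q x => pvPush q.1 q.2 x) init :=
  @List.Perm.foldl_eq _ _ _ _ _ ⟨fun q x y => pv_push_rcomm q x y⟩ p init

-- pushing a value v with 0 ≤ v onto the empty state
lemma pv_push00 (v : Int) (hv : 0 ≤ v) : pvPush 0 0 v = (v, 0) := by
  unfold pvPush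
  split_ifs <;> simp [Prod.ext_iff] <;> omega

-- below the current top, pvPush only tracks the running maximum in the second slot
lemma pv_fold_snd (l : List Int) (a b : Int) (hall : ∀ x ∈ l, x ≤ a) :
    l.foldl (fun q x => pvPush q.1 q.2 x) (a, b) = (a, l.foldl max b) := by
  induction l generalizing b with
  | nil => rfl
  | cons x t ih =>
    have hx := hall x (by simp)
    have hpx : pvPush a b x = (a, max b x) := by
      unfold pvPush
      split_ifs <;> simp [Prod.ext_iff] <;> omega
    simp only [List.foldl_cons, hpx]
    exact ih (max b x) (fun y hy => hall y (by simp [hy]))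

-- a running maximum over elements all ≤ b stays b
lemma pv_fold_max (l : List Int) (b : Int) (hall : ∀ x ∈ l, x ≤ b) : l.foldl max b = b := by
  induction l with
  | nil => rfl
  | cons x t ih =>
    have hx := hall x (by simp)
    simp only [List.foldl_cons, max_eq_left hx]
    exact ih (fun y hy => hall y (by simp [hy]))

-- the pvPush fold over a weakly descending list of nonnegatives reads off its first two entries
lemma pv_fold_desc (vs : List Int) (hpw : vs.Pairwise (fun p q => q ≤ p))
    (hpos : ∀ x ∈ vs, 0 ≤ x) :
    vs.foldl (fun q x => pvPush q.1 q.2 x) (0, 0) = (vs.headD 0, vs.tail.headD 0) := by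
  cases vs with
  | nil => rfl
  | cons a t =>
    have ha : 0 ≤ a := hpos a (by simp)
    have hts := (List.pairwise_cons.mp hpw).1
    simp only [List.foldl_cons]
    rw [pv_push00 a ha, pv_fold_snd t a 0 hts]
    cases t with
    | nil => rfl
    | cons b u =>
      have hb : 0 ≤ b := hpos b (by simp)
      have hbu := (List.pairwise_cons.mp (List.pairwise_cons.mp hpw).2).1
      simp only [List.foldl_cons, List.headD_cons, List.tail_cons]
      rw [max_eq_right hb, pv_fold_max u b hbu]

-- the run lengths of a list, value by value (first-occurrence order)
def pvRuns : List Char → List Int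
  | [] => []
  | x :: t => (((x :: t).count x : Nat) : Int) :: pvRuns (t.filter (fun y => y != x))
termination_by l => l.length
decreasing_by simp [List.length_filter_le]

-- scanning a sorted tail from a mid-run state (run so far of character c, two best runs in (a, b))
lemma pv_scan (s : List Char) (c : Char) (a b run : Int) (hs : s.Pairwise (· ≤ ·))
    (hc : ∀ x ∈ s, c ≤ x) :
    pvPush (s.foldl pvStep (a, b, run, some c)).1 (s.foldl pvStep (a, b, run, some c)).2.1
        (s.foldl pvStep (a, b, run, some c)).2.2.1 =
      ((run + (s.count c : Int)) :: pvRuns (s.filter (fun y => y != c))).foldl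
        (fun q x => pvPush q.1 q.2 x) (a, b) := by
  induction s generalizing a b run c with
  | nil => simp [pvRuns]
  | cons x t ih =>
    have hs' := (List.pairwise_cons.mp hs).2
    have hxall := (List.pairwise_cons.mp hs).1
    by_cases hxc : x = c
    · subst hxc
      have hstep : pvStep (a, b, run, some x) x = (a, b, run + 1, some x) := by
        simp [pvStep]
      rw [List.foldl_cons, hstep, ih _ _ _ _ hs' hxall]
      have hfil : (x :: t).filter (fun y => y != x) = t.filter (fun y => y != x) := by
        simp [List.filter_cons]
      have hval : run + 1 + ((t.count x : Nat) : Int) = run + (((x :: t).count x : Nat) : Int) := by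
        rw [List.count_cons_self]
        push_cast
        ring
      rw [hfil, ← hval]
    · have hcx : c < x := lt_of_le_of_ne (hc x (by simp)) (fun h => hxc h.symm)
      have hstep : pvStep (a, b, run, some c) x =
          ((pvPush a b run).1, (pvPush a b run).2, 1, some x) := by
        simp [pvStep, hxc]
      have hnotin : c ∉ x :: t := by
        intro hm
        rcases List.mem_cons.mp hm with h | h
        · exact hxc h.symm
        · exact absurd (hxall c h) (not_le.mpr hcx)
      have hcnt0 : (x :: t).count c = 0 := List.count_eq_zero.mpr hnotin
      have hfil : (x :: t).filter (fun y => y != c) = x :: t := by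
        apply List.filter_eq_self.mpr
        intro y hy
        rcases List.mem_cons.mp hy with rfl | hyt
        · simpa using ne_of_gt hcx
        · have : c < y := lt_of_lt_of_le hcx (hxall y hyt)
          simpa using ne_of_gt this
      rw [List.foldl_cons, hstep, ih _ _ _ _ hs' hxall, hcnt0, hfil, pvRuns]
      simp only [List.foldl_cons, Nat.cast_zero, add_zero, List.count_cons_self,
        Nat.cast_add, Nat.cast_one]
      congr 1
      show pvPush (pvPush a b run).1 (pvPush a b run).2 (1 + (t.count x : Int)) =
        pvPush (pvPush a b run).1 (pvPush a b run).2 ((t.count x : Int) + 1)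
      ring_nf

-- the multiset of run lengths is the multiset of per-value counts
lemma pv_runs_perm (s : List Char) :
    (pvRuns s).Perm ((PySem.Set.ofList s).map (fun c => (s.count c : Int))) := by
  have H : ∀ (n : Nat) (s : List Char), s.length ≤ n →
      (pvRuns s).Perm ((PySem.Set.ofList s).map (fun c => (s.count c : Int))) := by
    intro n
    induction n with
    | zero =>
      intro s hsl
      have hs0 : s = [] := List.eq_nil_of_length_eq_zero (Nat.le_zero.mp hsl)
      subst hs0
      simp [pvRuns]
    | succ n ihn =>
      intro s hsl
      cases s with
      | nil => simp [pvRuns]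
      | cons x t =>
        have ih := ihn (t.filter (fun y => y != x)) (by
          have h1 := List.length_filter_le (fun y => y != x) t
          have h2 : t.length + 1 ≤ n + 1 := by simpa using hsl
          omega)
        rw [pvRuns]
        have hnodup := PySem.Set.nodup_ofList (x :: t)
        have hnodup2 : (x :: (PySem.Set.ofList (t.filter (fun y => y != x)) : List Char)).Nodup := by
          refine List.nodup_cons.mpr ⟨?_, PySem.Set.nodup_ofList _⟩
          intro hx
          have := (PySem.Set.mem_ofList _ x).mp hx
          simp at this
        have hpermC : (PySem.Set.ofList (x :: t) : List Char).Perm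
            (x :: PySem.Set.ofList (t.filter (fun y => y != x))) := by
          rw [List.perm_ext_iff_of_nodup hnodup hnodup2]
          intro d
          rw [PySem.Set.mem_ofList]
          constructor
          · intro hd
            rcases List.mem_cons.mp hd with rfl | hdt
            · exact List.mem_cons_self
            · by_cases hdx : d = x
              · rw [hdx]; exact List.mem_cons_self
              · refine List.mem_cons.mpr (Or.inr ?_)
                rw [PySem.Set.mem_ofList]
                exact List.mem_filter.mpr ⟨hdt, by simpa using hdx⟩
          · intro hd
            rcases List.mem_cons.mp hd with rfl | hdt
            · exact List.mem_cons_self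
            · rw [PySem.Set.mem_ofList] at hdt
              exact List.mem_cons.mpr (Or.inr (List.mem_filter.mp hdt).1)
        have hcnt : ∀ d ∈ (PySem.Set.ofList (t.filter (fun y => y != x)) : List Char),
            ((t.filter (fun y => y != x)).count d : Int) = ((x :: t).count d : Int) := by
          intro d hd
          have hdm := (PySem.Set.mem_ofList _ d).mp hd
          have hdx : d ≠ x := by
            have := (List.mem_filter.mp hdm).2
            simpa using this
          have h1 : (t.filter (fun y => y != x)).count d = t.count d :=
            List.count_filter (by simpa using hdx)
          rw [h1, List.count_cons]
          have hxd : ¬ x = d := fun h => hdx h.symm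
          simp [hxd]
        refine List.Perm.trans ?_ ((hpermC.map (fun c => ((x :: t).count c : Int))).symm)
        simp only [List.map_cons]
        refine List.Perm.cons _ ?_
        refine ih.trans ?_
        rw [List.map_congr_left hcnt]
  exact H s.length s le_rfl

-- B's whole scan equals the pvPush fold over the per-card counts of the hand's non-joker cards
lemma pv_B_pair (L : List Char) :
    pvPush ((PySem.List.sorted (L.filter (fun c => c != 'J')) (fun c => c) false).foldl
          pvStep (0, 0, 0, none)).1
        ((PySem.List.sorted (L.filter (fun c => c != 'J')) (fun c => c) false).foldl
          pvStep (0, 0, 0, none)).2.1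
        ((PySem.List.sorted (L.filter (fun c => c != 'J')) (fun c => c) false).foldl
          pvStep (0, 0, 0, none)).2.2.1
      = (((PySem.Set.ofList L).filter (fun c => c != 'J')).map (fun c => (L.count c : Int))).foldl
          (fun q x => pvPush q.1 q.2 x) (0, 0) := by
  have hFnd : ((PySem.Set.ofList L).filter (fun c => c != 'J')).Nodup :=
    (PySem.Set.nodup_ofList L).filter _
  have hsper := PySem.List.sorted_perm (L.filter (fun c => c != 'J')) (fun c => c) false
  have hsp : (PySem.List.sorted (L.filter (fun c => c != 'J')) (fun c => c) false).Pairwise (· ≤ ·) := by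
    simpa using PySem.List.sorted_pairwise (L.filter (fun c => c != 'J')) (fun c => c)
  generalize hgen : PySem.List.sorted (L.filter (fun c => c != 'J')) (fun c => c) false = s at hsp hsper
  have h1 : pvPush (s.foldl pvStep (0, 0, 0, none)).1 (s.foldl pvStep (0, 0, 0, none)).2.1
      (s.foldl pvStep (0, 0, 0, none)).2.2.1 =
      (pvRuns s).foldl (fun q x => pvPush q.1 q.2 x) (0, 0) := by
    cases s with
    | nil => simp [pvPush, pvRuns]
    | cons x t =>
      have hstep : pvStep (0, 0, 0, none) x = ((pvPush 0 0 0).1, (pvPush 0 0 0).2, 1, some x) := by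
        simp [pvStep]
      have hts := (List.pairwise_cons.mp hsp).1
      rw [List.foldl_cons, hstep,
        pv_scan t x (pvPush 0 0 0).1 (pvPush 0 0 0).2 1 (List.pairwise_cons.mp hsp).2 hts,
        pvRuns]
      simp only [List.foldl_cons, List.count_cons_self, Nat.cast_add, Nat.cast_one]
      have h000 : pvPush 0 0 0 = (0, 0) := by decide
      rw [h000]
      congr 1
      show pvPush 0 0 (1 + (t.count x : Int)) = pvPush 0 0 ((t.count x : Int) + 1)
      ring_nf
  rw [h1, pv_foldl_perm _ _ (pv_runs_perm s) (0, 0)]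
  have hsL : ∀ d, d ∈ (PySem.Set.ofList s : List Char) ↔ (d ∈ L ∧ d ≠ 'J') := by
    intro d
    rw [PySem.Set.mem_ofList, hsper.mem_iff, List.mem_filter]
    simp
  have hcnt : ∀ d ∈ (PySem.Set.ofList s : List Char), (s.count d : Int) = (L.count d : Int) := by
    intro d hd
    have hdm := (hsL d).mp hd
    have h2 : s.count d = (L.filter (fun c => c != 'J')).count d := hsper.count_eq d
    rw [h2, List.count_filter (by simpa using hdm.2)]
  rw [List.map_congr_left hcnt]
  refine pv_foldl_perm _ _ (List.Perm.map _ ?_) (0, 0)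
  rw [List.perm_ext_iff_of_nodup (PySem.Set.nodup_ofList s) hFnd]
  intro d
  rw [hsL d, List.mem_filter, PySem.Set.mem_ofList]
  simp

-- the joker-merged profile, read off the same pvPush fold
lemma pv_profileL_fold (L : List Char) :
    pvProfileL L =
      (((((PySem.Set.ofList L).filter (fun c => c != 'J')).map (fun c => (L.count c : Int))).foldl
          (fun q x => pvPush q.1 q.2 x) (0, 0)).1 + (L.count 'J' : Int),
       ((((PySem.Set.ofList L).filter (fun c => c != 'J')).map (fun c => (L.count c : Int))).foldl
          (fun q x => pvPush q.1 q.2 x) (0, 0)).2) := by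
  have hvperm := (PySem.List.sorted_perm (((PySem.Set.ofList L).filter (fun c => c != 'J')).map
      (fun c => (L.count c : Int))) (fun x => x) true).symm
  have hpw : (PySem.List.sorted (((PySem.Set.ofList L).filter (fun c => c != 'J')).map
      (fun c => (L.count c : Int))) (fun x => x) true).Pairwise (fun p q => q ≤ p) := by
    simpa using PySem.List.sorted_pairwise_rev (((PySem.Set.ofList L).filter (fun c => c != 'J')).map
      (fun c => (L.count c : Int))) (fun x => x)
  have hpos : ∀ x ∈ PySem.List.sorted (((PySem.Set.ofList L).filter (fun c => c != 'J')).map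
      (fun c => (L.count c : Int))) (fun x => x) true, 0 ≤ x := by
    intro x hx
    obtain ⟨d, -, rfl⟩ := List.mem_map.mp (hvperm.mem_iff.mpr hx)
    positivity
  rw [pv_foldl_perm _ _ hvperm (0, 0), pv_fold_desc _ hpw hpos]
  unfold pvProfileL
  cases h : PySem.List.sorted (((PySem.Set.ofList L).filter (fun c => c != 'J')).map
      (fun c => (L.count c : Int))) (fun x => x) true with
  | nil => simp
  | cons a t =>
    cases t with
    | nil => simp
    | cons b u => simp

-- A's (top, second) key equals the pvPush fold over the merged count multiset
lemma pv_final (ks : List (Char × Int)) (vals : List Int)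
    (hperm : (ks.map (fun p => p.2)).Perm vals)
    (hpos : ∀ x ∈ vals, 0 ≤ x) :
    ((((PySem.List.sorted ks (fun p => p.2) true)[0]?.getD ('A', 0)).2),
      (if (PySem.List.sorted ks (fun p => p.2) true).length = 1 then (0:Int)
       else ((PySem.List.sorted ks (fun p => p.2) true)[1]?.getD ('A', 0)).2))
    = vals.foldl (fun q x => pvPush q.1 q.2 x) (0, 0) := by
  have hvperm : vals.Perm (PySem.List.sorted vals (fun x => x) true) :=
    (PySem.List.sorted_perm vals (fun x => x) true).symm
  have hpw : (PySem.List.sorted vals (fun x => x) true).Pairwise (fun p q => q ≤ p) := by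
    simpa using PySem.List.sorted_pairwise_rev vals (fun x => x)
  obtain ⟨h1, h2⟩ := pv_key_eq ks (PySem.List.sorted vals (fun x => x) true)
    (hperm.trans hvperm) hpw
  rw [h1, h2, pv_foldl_perm _ _ hvperm (0, 0),
    pv_fold_desc _ hpw (fun x hx => hpos x (hvperm.mem_iff.mpr hx))]
  cases PySem.List.sorted vals (fun x => x) true with
  | nil => simp
  | cons a t =>
    cases t with
    | nil => simp
    | cons b u => simp

-- on the seven admissible keys the table lookup and B's if-chain agree
lemma pv_table_chain (tp sec : Int)
    (hkey : (tp, sec) ∈ ([((5:Int),(0:Int)),(4,1),(3,2),(3,1),(2,2),(2,1),(1,1)] : List (Int × Int))) :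
    pvStrengthTable.getD (tp, sec) 0 =
      (if tp = 5 then (1:Int) else if tp = 4 then 2
       else if tp = 3 then (if sec = 2 then 3 else 4)
       else if tp = 2 then (if sec = 2 then 5 else 6) else 7) := by
  simp only [List.mem_cons, List.not_mem_nil, or_false, Prod.mk.injEq] at hkey
  rcases hkey with ⟨rfl, rfl⟩ | ⟨rfl, rfl⟩ | ⟨rfl, rfl⟩ | ⟨rfl, rfl⟩ | ⟨rfl, rfl⟩ | ⟨rfl, rfl⟩ | ⟨rfl, rfl⟩ <;> decide

-- ===== VERDICT (by name: the statement is the Claim_ definition above) =====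
theorem handSortKey_spec : Claim_equal_handSortKey := by
  unfold Claim_equal_handSortKey Spec_handSortKey
  intro hand _ hpre
  obtain ⟨hne0, hdeckall, hkeymem⟩ := hpre
  simp only [handSortKey, handSortKey_alt]
  generalize hG : hand.toList = L at hne0 hdeckall hkeymem ⊢
  congr 1
  simp only [PySem.Dict.getD_counter]
  have hKnd : (PySem.Set.ofList L : List Char).Nodup := PySem.Set.nodup_ofList L
  have hFnd : ((PySem.Set.ofList L).filter (fun c => c != 'J')).Nodup := hKnd.filter _
  have hmemF : ∀ x, x ∈ (PySem.Set.ofList L).filter (fun c => c != 'J') ↔ (x ∈ L ∧ x ≠ 'J') := by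
    intro x
    simp [List.mem_filter, PySem.Set.mem_ofList]
  -- B's pair, as the fold over the non-joker per-card counts
  rw [pv_B_pair L]
  rw [pv_profileL_fold L] at hkeymem
  by_cases hj : L.count 'J' = 0
  · -- no joker in the hand
    rw [if_neg (by simp [hj] : ¬(((L.count 'J' : Nat) : Int) ≠ 0))]
    simp only [PySem.Dict.items_counter]
    have hJL : 'J' ∉ L := List.count_eq_zero.mp hj
    have hfil : (PySem.Set.ofList L).filter (fun c => c != 'J') = PySem.Set.ofList L := by
      apply List.filter_eq_self.mpr
      intro a ha
      have : a ≠ 'J' := fun h => hJL (h ▸ (PySem.Set.mem_ofList L a).mp ha)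
      simpa using this
    have hA := pv_final ((PySem.Set.ofList L).map (fun k => (k, (L.count k : Int))))
      ((PySem.Set.ofList L).map (fun k => (L.count k : Int)))
      (by rw [List.map_map]; exact List.Perm.refl _)
      (by
        intro x hx
        obtain ⟨k, -, rfl⟩ := List.mem_map.mp hx
        positivity)
    rw [hfil] at hkeymem ⊢
    rw [hj] at hkeymem ⊢
    simp only [Nat.cast_zero, add_zero] at hkeymem ⊢
    have hA' : ((((PySem.List.sorted ((PySem.Set.ofList L).map (fun k => (k, (L.count k : Int))))
          (fun p => p.2) true)[0]?.getD ('A', 0)).2),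
        (if (PySem.List.sorted ((PySem.Set.ofList L).map (fun k => (k, (L.count k : Int))))
            (fun p => p.2) true).length = 1 then (0:Int)
         else ((PySem.List.sorted ((PySem.Set.ofList L).map (fun k => (k, (L.count k : Int))))
            (fun p => p.2) true)[1]?.getD ('A', 0)).2))
        = (((((PySem.Set.ofList L)).map (fun c => (L.count c : Int))).foldl
            (fun q x => pvPush q.1 q.2 x) (0, 0)).1,
           ((((PySem.Set.ofList L)).map (fun c => (L.count c : Int))).foldl
            (fun q x => pvPush q.1 q.2 x) (0, 0)).2) := by
      rw [hA]
    rw [hA']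
    exact pv_table_chain _ _ hkeymem
  · -- joker branch
    rw [if_pos (by simpa using hj : (((L.count 'J' : Nat) : Int) ≠ 0))]
    simp only [PySem.Dict.items_counter]
    have hJL : 'J' ∈ L := by
      by_contra h; exact hj (List.count_eq_zero.mpr h)
    have hJK : 'J' ∈ PySem.Set.ofList L := (PySem.Set.mem_ofList L 'J').mpr hJL
    cases hf : List.find? (fun p => p.1 != 'J')
        (PySem.List.sorted ((PySem.Set.ofList L).map (fun k => (k, (L.count k : Int))))
          (fun p => p.2) true) with
    | none =>
      -- every card is a joker
      have hall : ∀ k ∈ PySem.Set.ofList L, k = 'J' := by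
        intro k hk
        have hmem' : (k, (L.count k : Int)) ∈
            PySem.List.sorted ((PySem.Set.ofList L).map (fun k => (k, (L.count k : Int))))
              (fun p => p.2) true :=
          (PySem.List.sorted_perm _ _ _).mem_iff.mpr (List.mem_map.mpr ⟨k, hk, rfl⟩)
        have := List.find?_eq_none.mp hf _ hmem'
        simpa using this
      have hK : PySem.Set.ofList L = ['J'] := pv_eq_singleton _ hJK hKnd hall
      have hAL : 'A' ∉ L := fun hA =>
        absurd (hall 'A' ((PySem.Set.mem_ofList L 'A').mpr hA)) (by decide)
      have hA0 : L.count 'A' = 0 := List.count_eq_zero.mpr hAL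
      have hnc : (PySem.Dict.counter L).contains 'A' = false := by
        rw [PySem.Dict.contains_counter]
        simpa [List.contains_eq_mem] using hAL
      simp only [Option.map_none, Option.getD_none]
      have hitems : (((PySem.Dict.counter L).insert 'A'
            ((L.count 'A' : Int) + (L.count 'J' : Int))).erase 'J').items
          = [('A', (L.count 'A' : Int) + (L.count 'J' : Int))] := by
        unfold PySem.Dict.erase
        show ((((PySem.Dict.counter L).insert 'A'
            ((L.count 'A' : Int) + (L.count 'J' : Int))).items.filter (fun p => !(p.1 == 'J')))) = _
        rw [PySem.Dict.items_insert_of_not_contains _ _ hnc, PySem.Dict.items_counter, hK]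
        rfl
      rw [hitems]
      have hFnil : (PySem.Set.ofList L).filter (fun c => c != 'J') = [] := by
        rw [hK]; rfl
      rw [hFnil] at hkeymem ⊢
      simp only [List.map_nil, List.foldl_nil, Nat.cast_zero, zero_add, add_zero] at hkeymem ⊢
      have hA := pv_final [('A', (L.count 'A' : Int) + (L.count 'J' : Int))]
        [(L.count 'A' : Int) + (L.count 'J' : Int)] (by simp)
        (by intro x hx; simp only [List.mem_singleton] at hx; subst hx; positivity)
      have hfold : ([(L.count 'A' : Int) + (L.count 'J' : Int)].foldl
          (fun q x => pvPush q.1 q.2 x) (0, 0)) = ((L.count 'A' : Int) + (L.count 'J' : Int), 0) := by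
        simp only [List.foldl_cons, List.foldl_nil]
        exact pv_push00 _ (by positivity)
      rw [hA, hfold, hA0]
      simp only [Nat.cast_zero, zero_add]
      exact pv_table_chain _ _ hkeymem
    | some pr =>
      obtain ⟨hprT, as, bs, hdec, hallas⟩ := List.find?_eq_some_iff_append.mp hf
      have hjrne : pr.1 ≠ 'J' := by simpa using hprT
      have hprmem : pr ∈ (PySem.Set.ofList L).map (fun k => (k, (L.count k : Int))) :=
        (PySem.List.sorted_perm _ _ _).mem_iff.mp (hdec ▸ List.mem_append.mpr (Or.inr (by simp)))
      obtain ⟨jk, hjk, hjkv⟩ := List.mem_map.mp hprmem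
      have hj1 : pr.1 = jk := by rw [← hjkv]
      have hjkL : jk ∈ L := (PySem.Set.mem_ofList L jk).mp hjk
      have hjkne : jk ≠ 'J' := hj1 ▸ hjrne
      have hjkF : jk ∈ (PySem.Set.ofList L).filter (fun c => c != 'J') :=
        (hmemF jk).mpr ⟨hjkL, hjkne⟩
      -- jk has the maximal count among non-joker cards
      have hpw0 := PySem.List.sorted_pairwise_rev
        ((PySem.Set.ofList L).map (fun k => (k, (L.count k : Int)))) (fun p => p.2)
      rw [hdec] at hpw0
      obtain ⟨-, hpw2, -⟩ := List.pairwise_append.mp hpw0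
      have hbs : ∀ q ∈ bs, q.2 ≤ pr.2 := (List.pairwise_cons.mp hpw2).1
      have hj2 : pr.2 = (L.count jk : Int) := by rw [← hjkv]
      have hjrmax : ∀ k ∈ PySem.Set.ofList L, k ≠ 'J' → (L.count k : Int) ≤ (L.count jk : Int) := by
        intro k hk hkne
        have hmem' : (k, (L.count k : Int)) ∈
            PySem.List.sorted ((PySem.Set.ofList L).map (fun k => (k, (L.count k : Int))))
              (fun p => p.2) true :=
          (PySem.List.sorted_perm _ _ _).mem_iff.mpr (List.mem_map.mpr ⟨k, hk, rfl⟩)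
        rw [hdec] at hmem'
        rcases List.mem_append.mp hmem' with h1 | h2
        · exact absurd (by simpa using hallas _ h1) hkne
        · rcases List.mem_cons.mp h2 with he | hbs'
          · rw [show k = jk from by simpa [hj1] using congrArg Prod.fst he]
          · have := hbs _ hbs'
            rw [hj2] at this
            simpa using this
      have hcont : (PySem.Dict.counter L).contains jk = true := by
        rw [PySem.Dict.contains_counter]
        exact List.elem_eq_true_of_mem hjkL
      rw [Option.map_some, Option.getD_some, hj1]
      -- the items of the mutated counter
      have hitems : (((PySem.Dict.counter L).insert jk
            ((L.count jk : Int) + (L.count 'J' : Int))).erase 'J').items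
          = ((PySem.Set.ofList L).filter (fun c => c != 'J')).map
              (fun k => (k, if k = jk then (L.count k : Int) + (L.count 'J' : Int)
                            else (L.count k : Int))) := by
        unfold PySem.Dict.erase
        show (((PySem.Dict.counter L).insert jk
            ((L.count jk : Int) + (L.count 'J' : Int))).items.filter (fun p => !(p.1 == 'J'))) = _
        rw [PySem.Dict.items_insert_of_contains _ _ hcont, PySem.Dict.items_counter,
          List.map_map, List.filter_map]
        rw [List.filter_congr (l := PySem.Set.ofList L)
          (q := fun c => c != 'J') (by
            intro a ha
            by_cases hajk : a = jk
            · subst hajk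
              simp [bne]
            · simp [bne, hajk])]
        apply List.map_congr_left
        intro k hk
        by_cases hkjk : k = jk
        · subst hkjk; simp
        · simp [hkjk]
      rw [hitems]
      -- the merged values, reordered with jk's bumped count in front
      have hpermb : (((PySem.Set.ofList L).filter (fun c => c != 'J')).map
            (fun k => if k = jk then (L.count k : Int) + (L.count 'J' : Int) else (L.count k : Int))).Perm
          (((L.count jk : Int) + (L.count 'J' : Int)) ::
            (((PySem.Set.ofList L).filter (fun c => c != 'J')).erase jk).map
              (fun k => (L.count k : Int))) := by
        have hp := (List.perm_cons_erase hjkF).map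
          (fun k => if k = jk then (L.count k : Int) + (L.count 'J' : Int) else (L.count k : Int))
        simp only [List.map_cons, if_pos rfl] at hp
        refine hp.trans (List.Perm.cons _ ?_)
        rw [List.map_congr_left (g := fun k => (L.count k : Int)) (by
          intro k hk
          have : k ≠ jk := ((hFnd.mem_erase_iff).mp hk).1
          simp [this])]
      have hpermc : (((PySem.Set.ofList L).filter (fun c => c != 'J')).map
            (fun k => (L.count k : Int))).Perm
          ((L.count jk : Int) ::
            (((PySem.Set.ofList L).filter (fun c => c != 'J')).erase jk).map
              (fun k => (L.count k : Int))) := by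
        have hp := (List.perm_cons_erase hjkF).map (fun k => (L.count k : Int))
        simpa using hp
      have hrest : ∀ x ∈ (((PySem.Set.ofList L).filter (fun c => c != 'J')).erase jk).map
          (fun k => (L.count k : Int)), x ≤ (L.count jk : Int) := by
        intro x hx
        obtain ⟨k, hk, rfl⟩ := List.mem_map.mp hx
        have hkF := (hmemF k).mp (List.mem_of_mem_erase hk)
        exact hjrmax k ((PySem.Set.mem_ofList L k).mpr hkF.1) hkF.2
      have hcjk1 : (1:Int) ≤ (L.count jk : Int) := by
        have : 0 < L.count jk := List.count_pos_iff.mpr hjkL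
        exact_mod_cast this
      have hcj0 : (0:Int) ≤ (L.count 'J' : Int) := by positivity
      -- A's pair
      have hA := pv_final (((PySem.Set.ofList L).filter (fun c => c != 'J')).map
          (fun k => (k, if k = jk then (L.count k : Int) + (L.count 'J' : Int) else (L.count k : Int))))
        (((PySem.Set.ofList L).filter (fun c => c != 'J')).map
          (fun k => if k = jk then (L.count k : Int) + (L.count 'J' : Int) else (L.count k : Int)))
        (by rw [List.map_map]; exact List.Perm.refl _)
        (by
          intro x hx
          obtain ⟨k, -, rfl⟩ := List.mem_map.mp hx
          by_cases hkjk : k = jk <;> simp [hkjk] <;> positivity)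
      rw [hA, pv_foldl_perm _ _ hpermb (0, 0)]
      simp only [List.foldl_cons]
      rw [pv_push00 _ (by omega),
        pv_fold_snd _ _ _ (fun x hx => le_trans (hrest x hx) (by omega))]
      -- B's fold and the profile, in the same shape
      have hBeq : ((((PySem.Set.ofList L).filter (fun c => c != 'J')).map
            (fun c => (L.count c : Int))).foldl (fun q x => pvPush q.1 q.2 x) (0, 0))
          = ((L.count jk : Int),
             ((((PySem.Set.ofList L).filter (fun c => c != 'J')).erase jk).map
               (fun k => (L.count k : Int))).foldl max 0) := by
        rw [pv_foldl_perm _ _ hpermc (0, 0)]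
        simp only [List.foldl_cons]
        rw [pv_push00 _ (by omega), pv_fold_snd _ _ _ hrest]
      simp only [hBeq] at hkeymem ⊢
      exact pv_table_chain _ _ hkeymem
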